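-- pv_equiv track=rewrite | github.com/sshmilyy/index_time-average | index asymptotic optimality/index_sort.py | sort_3d_array
-- ===== SOURCE A (Python) =====
-- def sort_3d_array(R, L, A):
--     """
--     对三维数组索引 (r, l, a) 进行排序
--
--     参数:
--     R: 第一维的最大值 (1-R)
--     L: 第二维的最大值 (1-L)
--     A: 第三维的最大值 (0-(A-1))
--
--     返回:
--     排序后的索引列表
--     """
--     # 生成所有可能的组合
--     indices = []
--     for r in range(1, R + 1):
--         for l in range(1, L + 1):
--             for a in range(A):
--                 indices.append((r, l, a))
--
--     # 自定义排序函数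
--     def sort_key(item):
--         r, l, a = item
--         # 计算 index = r - 3*(l-1) - a
--         index = r - 3 * (l - 1) - a
--         # 返回排序键值：
--         # 1. 首先按 -index 排序（从大到小）
--         # 2. 然后按 l 排序（从小到大）
--         # 3. 然后按 -r 排序（从大到小）
--         # 4. 最后按 a 排序（从小到大）
--         return (-index, l, -r, a)
--
--     # 排序并返回结果
--     sorted_indices = sorted(indices, key=sort_key)
--     return sorted_indices
-- ===== SOURCE B (Python) =====
-- def sort_3d_array(R, L, A):
--     # Direct in-order generation: emit triples by decreasing index = r - 3*(l - 1) - a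
--     # (primary key), then increasing l, then decreasing r; a = r - 3*(l-1) - index is
--     # determined, so no sort is needed.  The l and r ranges are clamped so that every
--     # visited (index, l) pair emits at least one triple: total work is O(R*L*A).
--     if R <= 0 or L <= 0 or A <= 0:
--         return []
--     out = []
--     # index runs from R (r=R, l=1, a=0) down to 5 - 3*L - A (r=1, l=L, a=A-1)
--     for d in range(R + 3 * L + A - 4):
--         idx = R - d
--         # l must allow some r in [1, R] with a in [0, A): ceil/floor bounds
--         l_lo = max(1, (4 - A - idx) // 3 + 1)
--         l_hi = min(L, (R - idx) // 3 + 1)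
--         for l in range(l_lo, l_hi + 1):
--             base = idx + 3 * (l - 1)      # r = base + a
--             r_hi = min(R, base + A - 1)
--             r_lo = max(1, base)
--             for t in range(r_hi - r_lo + 1):
--                 r = r_hi - t
--                 out.append((r, l, r - base))
--     return out
-- ===== Notes on version B (the rewrite author's own statement) =====
-- stated objective: faster
-- what changed: B generates the triples directly in sorted order (outer loop over the composite index value descending, then l ascending, then r descending, with a determined arithmetically and the l/r ranges clamped so every visited pair emits output), so A's O(N log N) sort disappears.
import Mathlib
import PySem

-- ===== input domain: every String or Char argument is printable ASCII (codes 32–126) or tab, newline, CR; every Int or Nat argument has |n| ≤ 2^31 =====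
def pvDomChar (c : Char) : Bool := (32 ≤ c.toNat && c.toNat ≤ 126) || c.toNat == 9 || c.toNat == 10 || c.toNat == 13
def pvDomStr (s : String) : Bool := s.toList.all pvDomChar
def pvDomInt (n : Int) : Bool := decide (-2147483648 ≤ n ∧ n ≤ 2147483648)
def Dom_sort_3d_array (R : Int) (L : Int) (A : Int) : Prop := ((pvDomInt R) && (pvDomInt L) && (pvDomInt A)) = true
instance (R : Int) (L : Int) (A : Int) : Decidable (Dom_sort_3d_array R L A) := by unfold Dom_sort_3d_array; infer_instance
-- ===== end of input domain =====

-- B replaces A's enumerate-then-sort by direct generation of the triples in sorted order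
-- (composite index value descending, then l ascending, then r descending, a determined), removing the sort.

-- ===== PORT A =====
-- A's sort key is the tuple (-index, l, -r, a); it is ported as the single packed integer
-- pvPack (base 2^40), an exact lexicographic encoding on Dom, where every component of the
-- key of a generated triple has magnitude < 2^35 (the equivalence theorem assumes Dom).
def pvPack (k1 k2 k3 k4 : Int) : Int := k1 * 2 ^ 120 + k2 * 2 ^ 80 + k3 * 2 ^ 40 + k4

def pvKeyA (item : List Int) : Int :=
  match item with
  | [r, l, a] =>
      let index := r - 3 * (l - 1) - a
      pvPack (-index) l (-r) a
  | _ => 0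

def sort_3d_array (R : Int) (L : Int) (A : Int) : List (List Int) :=
  let indices : List (List Int) :=
    (PySem.List.pyRange 1 (R + 1) 1).foldl (fun acc r =>
      (PySem.List.pyRange 1 (L + 1) 1).foldl (fun acc l =>
        (PySem.List.pyRange 0 A 1).foldl (fun acc a => acc ++ [[r, l, a]]) acc) acc) []
  PySem.List.sorted indices pvKeyA false

-- ===== PORT B =====
def sort_3d_array_alt (R : Int) (L : Int) (A : Int) : List (List Int) :=
  if R ≤ 0 ∨ L ≤ 0 ∨ A ≤ 0 then []
  else
    (PySem.List.pyRange 0 (R + 3 * L + A - 4) 1).foldl (fun out d =>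
      let idx := R - d
      let llo := max 1 (PySem.Int.floordiv (4 - A - idx) 3 + 1)
      let lhi := min L (PySem.Int.floordiv (R - idx) 3 + 1)
      (PySem.List.pyRange llo (lhi + 1) 1).foldl (fun out l =>
        let base := idx + 3 * (l - 1)
        let rhi := min R (base + A - 1)
        let rlo := max 1 base
        (PySem.List.pyRange 0 (rhi - rlo + 1) 1).foldl (fun out t =>
          let r := rhi - t
          out ++ [[r, l, r - base]]) out) out) []

-- ===== PRECONDITION & SPEC =====
def Spec_sort_3d_array (R : Int) (L : Int) (A : Int) (out : List (List Int)) : Prop := out = sort_3d_array_alt R L A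
instance (R : Int) (L : Int) (A : Int) (out : List (List Int)) : Decidable (Spec_sort_3d_array R L A out) := by unfold Spec_sort_3d_array; infer_instance

-- ===== CLAIM (what is proved, stated in full; the proofs are below) =====
def Claim_equal_sort_3d_array : Prop := ∀ (R : Int) (L : Int) (A : Int), Dom_sort_3d_array R L A → Spec_sort_3d_array R L A (sort_3d_array R L A)

-- ===== LEMMAS AND PROOFS =====

-- normal (flatMap) form of A's enumeration loop
def pvIdxList (R L A : Int) : List (List Int) :=
  (PySem.List.pyRange 1 (R + 1) 1).flatMap (fun r =>
    (PySem.List.pyRange 1 (L + 1) 1).flatMap (fun l =>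
      (PySem.List.pyRange 0 A 1).map (fun a => [r, l, a])))

-- normal forms of B's generation loops (the let-bindings of the port written out)
def pvRowB (R A d l : Int) : List (List Int) :=
  (PySem.List.pyRange 0
      (min R (R - d + 3 * (l - 1) + A - 1) - max 1 (R - d + 3 * (l - 1)) + 1) 1).map
    (fun t => [min R (R - d + 3 * (l - 1) + A - 1) - t, l,
               min R (R - d + 3 * (l - 1) + A - 1) - t - (R - d + 3 * (l - 1))])

def pvBlockB (R L A d : Int) : List (List Int) :=
  (PySem.List.pyRange (max 1 (PySem.Int.floordiv (4 - A - (R - d)) 3 + 1))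
      (min L (PySem.Int.floordiv (R - (R - d)) 3 + 1) + 1) 1).flatMap (pvRowB R A d)

def pvGenB (R L A : Int) : List (List Int) :=
  (PySem.List.pyRange 0 (R + 3 * L + A - 4) 1).flatMap (pvBlockB R L A)

theorem pvA_eq (R L A : Int) :
    sort_3d_array R L A = PySem.List.sorted (pvIdxList R L A) pvKeyA false := by
  unfold sort_3d_array pvIdxList
  simp only [PySem.List.foldl_append_singleton_eq_map, PySem.List.foldl_append_eq_flatMap,
    List.nil_append]

theorem pvB_eq (R L A : Int) :
    sort_3d_array_alt R L A = if R ≤ 0 ∨ L ≤ 0 ∨ A ≤ 0 then [] else pvGenB R L A := by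
  unfold sort_3d_array_alt pvGenB pvBlockB pvRowB
  simp only [PySem.List.foldl_append_singleton_eq_map, PySem.List.foldl_append_eq_flatMap,
    List.nil_append]

theorem pvMem_idx (R L A : Int) (v : List Int) :
    v ∈ pvIdxList R L A ↔
      ∃ r l a : Int, 1 ≤ r ∧ r ≤ R ∧ 1 ≤ l ∧ l ≤ L ∧ 0 ≤ a ∧ a < A ∧ v = [r, l, a] := by
  unfold pvIdxList
  simp only [List.mem_flatMap, List.mem_map, PySem.List.mem_pyRange_one]
  constructor
  · rintro ⟨r, hr, l, hl, a, ha, rfl⟩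
    exact ⟨r, l, a, by omega, by omega, by omega, by omega, by omega, by omega, rfl⟩
  · rintro ⟨r, l, a, h1, h2, h3, h4, h5, h6, rfl⟩
    exact ⟨r, ⟨by omega, by omega⟩, l, ⟨by omega, by omega⟩, a, ⟨by omega, by omega⟩, rfl⟩

theorem pvMem_rowB (R A d l : Int) (v : List Int) :
    v ∈ pvRowB R A d l ↔
      ∃ r a : Int, 1 ≤ r ∧ r ≤ R ∧ 0 ≤ a ∧ a < A ∧ r - 3 * (l - 1) - a = R - d ∧ v = [r, l, a] := by
  unfold pvRowB
  simp only [List.mem_map, PySem.List.mem_pyRange_one]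
  constructor
  · rintro ⟨t, ht, rfl⟩
    exact ⟨min R (R - d + 3 * (l - 1) + A - 1) - t,
      min R (R - d + 3 * (l - 1) + A - 1) - t - (R - d + 3 * (l - 1)),
      by omega, by omega, by omega, by omega, by omega, rfl⟩
  · rintro ⟨r, a, h1, h2, h3, h4, h5, rfl⟩
    refine ⟨min R (R - d + 3 * (l - 1) + A - 1) - r, by omega, ?_⟩
    have h6 : min R (R - d + 3 * (l - 1) + A - 1) -
        (min R (R - d + 3 * (l - 1) + A - 1) - r) = r := by omega
    rw [h6]
    have h7 : r - (R - d + 3 * (l - 1)) = a := by omega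
    rw [h7]

theorem pvMem_genB (R L A : Int) (v : List Int) :
    v ∈ pvGenB R L A ↔
      ∃ r l a : Int, 1 ≤ r ∧ r ≤ R ∧ 1 ≤ l ∧ l ≤ L ∧ 0 ≤ a ∧ a < A ∧ v = [r, l, a] := by
  unfold pvGenB pvBlockB
  have h30 : (0:Int) < 3 := by omega
  simp only [List.mem_flatMap, PySem.List.mem_pyRange_one, pvMem_rowB,
    PySem.Int.floordiv_eq_ediv_of_pos h30]
  constructor
  · rintro ⟨d, hd, l, hl, r, a, h1, h2, h3, h4, h5, rfl⟩
    exact ⟨r, l, a, h1, h2, by omega, by omega, h3, h4, rfl⟩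
  · rintro ⟨r, l, a, h1, h2, h3, h4, h5, h6, rfl⟩
    exact ⟨R - (r - 3 * (l - 1) - a), ⟨by omega, by omega⟩, l, ⟨by omega, by omega⟩,
      r, a, h1, h2, h5, h6, by omega, rfl⟩

theorem pvNodup_idx (R L A : Int) : (pvIdxList R L A).Nodup := by
  unfold pvIdxList
  rw [List.nodup_flatMap]
  refine ⟨fun r _ => ?_, ?_⟩
  · rw [List.nodup_flatMap]
    refine ⟨fun l _ => ?_, ?_⟩
    · exact (PySem.List.nodup_pyRange_one 0 A).map (fun a b h => by simpa using h)
    · refine (PySem.List.pairwise_lt_pyRange_one 1 (L + 1)).imp ?_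
      intro l1 l2 hlt x hx1 hx2
      simp only [List.mem_map] at hx1 hx2
      obtain ⟨a1, _, rfl⟩ := hx1
      obtain ⟨a2, _, h⟩ := hx2
      simp at h; omega
  · refine (PySem.List.pairwise_lt_pyRange_one 1 (R + 1)).imp ?_
    intro r1 r2 hlt x hx1 hx2
    simp only [List.mem_flatMap, List.mem_map] at hx1 hx2
    obtain ⟨l1, _, a1, _, rfl⟩ := hx1
    obtain ⟨l2, _, a2, _, h⟩ := hx2
    simp at h; omega

theorem pvKeyA_eval (r l a : Int) : pvKeyA [r, l, a] = pvPack (-(r - 3 * (l - 1) - a)) l (-r) a := rfl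

theorem pvPack_lt {a1 a2 a3 a4 b1 b2 b3 b4 : Int}
    (h2 : |a2| ≤ 2 ^ 35) (h3 : |a3| ≤ 2 ^ 35) (h4 : |a4| ≤ 2 ^ 35)
    (h2' : |b2| ≤ 2 ^ 35) (h3' : |b3| ≤ 2 ^ 35) (h4' : |b4| ≤ 2 ^ 35)
    (hlex : a1 < b1 ∨ (a1 = b1 ∧ (a2 < b2 ∨ (a2 = b2 ∧ (a3 < b3 ∨ (a3 = b3 ∧ a4 < b4)))))) :
    pvPack a1 a2 a3 a4 < pvPack b1 b2 b3 b4 := by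
  unfold pvPack
  rw [abs_le] at h2 h3 h4 h2' h3' h4'
  omega

theorem pvPairwise_genB (R L A : Int) (hR : R ≤ 2 ^ 31) (hL : L ≤ 2 ^ 31) (hA : A ≤ 2 ^ 31) :
    (pvGenB R L A).Pairwise (fun x y => pvKeyA x < pvKeyA y) := by
  unfold pvGenB
  rw [List.pairwise_flatMap]
  constructor
  · -- each block is pairwise increasing
    intro d hd
    unfold pvBlockB
    rw [List.pairwise_flatMap]
    constructor
    · -- each row is pairwise increasing (r descends, so -r ascends; index and l are fixed)
      intro l hl
      have h30 : (0:Int) < 3 := by omega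
      rw [PySem.List.mem_pyRange_one, PySem.Int.floordiv_eq_ediv_of_pos h30,
        PySem.Int.floordiv_eq_ediv_of_pos h30] at hl
      unfold pvRowB
      rw [List.pairwise_map]
      refine (PySem.List.pairwise_lt_pyRange_one 0 _).imp_of_mem ?_
      intro t1 t2 ht1 ht2 hlt
      rw [PySem.List.mem_pyRange_one] at ht1 ht2
      rw [pvKeyA_eval, pvKeyA_eval]
      apply pvPack_lt (by rw [abs_le]; omega) (by rw [abs_le]; omega) (by rw [abs_le]; omega)
        (by rw [abs_le]; omega) (by rw [abs_le]; omega) (by rw [abs_le]; omega)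
      right
      refine ⟨by omega, ?_⟩
      right
      refine ⟨rfl, ?_⟩
      left; omega
    · -- rows with larger l come later (second key component; index is fixed)
      refine (PySem.List.pairwise_lt_pyRange_one _ _).imp_of_mem ?_
      intro l1 l2 hl1 hl2 hlt x hx y hy
      rw [PySem.List.mem_pyRange_one] at hl1 hl2
      rw [pvMem_rowB] at hx hy
      obtain ⟨r1, a1, p1, p2, p3, p4, p5, rfl⟩ := hx
      obtain ⟨r2, a2, q1, q2, q3, q4, q5, rfl⟩ := hy
      rw [pvKeyA_eval, pvKeyA_eval]
      apply pvPack_lt (by rw [abs_le]; omega) (by rw [abs_le]; omega) (by rw [abs_le]; omega)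
        (by rw [abs_le]; omega) (by rw [abs_le]; omega) (by rw [abs_le]; omega)
      right
      exact ⟨by omega, Or.inl hlt⟩
  · -- blocks with larger d have strictly larger -index (first key component)
    refine (PySem.List.pairwise_lt_pyRange_one 0 (R + 3 * L + A - 4)).imp_of_mem ?_
    intro d1 d2 hd1 hd2 hlt x hx y hy
    unfold pvBlockB at hx hy
    simp only [List.mem_flatMap, PySem.List.mem_pyRange_one, pvMem_rowB] at hx hy
    obtain ⟨l1, hl1, r1, a1, p1, p2, p3, p4, p5, rfl⟩ := hx
    obtain ⟨l2, hl2, r2, a2, q1, q2, q3, q4, q5, rfl⟩ := hy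
    rw [pvKeyA_eval, pvKeyA_eval]
    apply pvPack_lt (by rw [abs_le]; omega) (by rw [abs_le]; omega) (by rw [abs_le]; omega)
      (by rw [abs_le]; omega) (by rw [abs_le]; omega) (by rw [abs_le]; omega)
    left; omega

theorem pvPerm (R L A : Int) (hR : R ≤ 2 ^ 31) (hL : L ≤ 2 ^ 31) (hA : A ≤ 2 ^ 31) :
    (pvGenB R L A).Perm (pvIdxList R L A) := by
  have hnodup : (pvGenB R L A).Nodup :=
    (pvPairwise_genB R L A hR hL hA).imp (fun h heq => by subst heq; exact lt_irrefl _ h)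
  refine (List.perm_ext_iff_of_nodup hnodup (pvNodup_idx R L A)).mpr ?_
  intro v
  rw [pvMem_genB, pvMem_idx]

-- ===== VERDICT (by name: the statement is the Claim_ definition above) =====
theorem sort_3d_array_spec : Claim_equal_sort_3d_array := by
  intro R L A hDom
  unfold Spec_sort_3d_array
  simp only [Dom_sort_3d_array, pvDomInt, Bool.and_eq_true, decide_eq_true_eq] at hDom
  rw [pvA_eq, pvB_eq]
  by_cases h : R ≤ 0 ∨ L ≤ 0 ∨ A ≤ 0
  · rw [if_pos h, PySem.List.sorted_eq_nil_iff]
    rw [List.eq_nil_iff_forall_not_mem]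
    intro v hv
    rw [pvMem_idx] at hv
    obtain ⟨r, l, a, h1, h2, h3, h4, h5, h6, _⟩ := hv
    omega
  · rw [if_neg h]
    exact PySem.List.sorted_eq_of_perm_of_pairwise_lt _ _ _
      (pvPerm R L A hDom.1.1.2 hDom.1.2.2 hDom.2.2)
      (pvPairwise_genB R L A hDom.1.1.2 hDom.1.2.2 hDom.2.2)
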